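-- pv_equiv track=rewrite | github.com/icostin/ebfe-py | ebfe/tui.py | compute_styled_text_index_of_column
-- ===== SOURCE A (Python) =====
-- STYLE_BEGIN = '\a'
--
-- STYLE_END = '\b'
--
-- def get_char_width (ch):
--     return 1
--
-- def compute_styled_text_index_of_column (styled_text, column):
--     '''
--     Computes the index in the text corresponding to given column, assuming
--     index 0 corresponds to column 0.
--     This should take into account the width of unicode chars displayed.
--     Returns a pair (index, column). column may be smaller than column if
--     the char at index is double-width and would jump over requested column.
--     If the string is not as wide to reach the column the function returns
--     (None, text_width)
--     '''
--     c = 0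
--     text_mode = True
--     for i in range(len(styled_text)):
--         if text_mode:
--             ch = styled_text[i]
--             if ch == STYLE_BEGIN:
--                 text_mode = False
--                 continue
--             w = get_char_width(ch)
--             if c + w > column: return i, c
--             c += w
--         else:
--             if styled_text[i] == STYLE_END:
--                 text_mode = True
--     return None, c
-- ===== SOURCE B (Python) =====
-- STYLE_BEGIN = '\a'
--
-- STYLE_END = '\b'
--
-- def get_char_width (ch):
--     return 1
--
-- def compute_styled_text_index_of_column (styled_text, column):
--     # Pass 1: strip style-marker regions, keeping (original_index, char) of visible chars.
--     visible = []
--     text_mode = True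
--     for i, ch in enumerate(styled_text):
--         if text_mode:
--             if ch == STYLE_BEGIN:
--                 text_mode = False
--             else:
--                 visible.append((i, ch))
--         elif ch == STYLE_END:
--             text_mode = True
--     # Pass 2: walk columns over the visible chars.
--     c = 0
--     for i, ch in visible:
--         w = get_char_width(ch)
--         if c + w > column:
--             return i, c
--         c += w
--     return None, c
-- ===== Notes on version B (the rewrite author's own statement) =====
-- stated objective: alternative
-- what changed: Replaced A's single interleaved scan (mode flag + column accumulator in one loop) with two passes: a marker-stripping pass building a list of (index, char) visible pairs, then a separate column-walk over that list.
import Mathlib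
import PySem

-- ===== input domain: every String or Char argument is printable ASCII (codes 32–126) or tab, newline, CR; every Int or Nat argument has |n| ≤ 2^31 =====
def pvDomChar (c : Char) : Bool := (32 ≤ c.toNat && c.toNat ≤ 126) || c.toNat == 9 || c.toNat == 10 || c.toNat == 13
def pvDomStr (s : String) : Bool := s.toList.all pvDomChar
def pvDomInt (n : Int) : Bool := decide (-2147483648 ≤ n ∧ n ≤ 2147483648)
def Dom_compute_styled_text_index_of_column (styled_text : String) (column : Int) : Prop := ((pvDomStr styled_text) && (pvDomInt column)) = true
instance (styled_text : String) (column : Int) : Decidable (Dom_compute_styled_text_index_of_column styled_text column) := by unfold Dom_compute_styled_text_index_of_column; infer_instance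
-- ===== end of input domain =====

-- B replaces A's single interleaved scan with two passes (strip style markers, then walk
-- columns over the visible chars); same cost, different decomposition.

def STYLE_BEGIN : Char := Char.ofNat 7
def STYLE_END : Char := Char.ofNat 8

def get_char_width (_ch : Char) : Int := 1

-- ===== PORT A =====
-- one interleaved loop over the enumerated chars with state (c, text_mode)
def pvALoop (column : Int) : List (Int × Char) → Int → Bool → Option Int × Int
  | [], c, _ => (none, c)
  | (i, ch) :: rest, c, text_mode =>
    if text_mode then
      if ch = STYLE_BEGIN then pvALoop column rest c false
      else
        let w := get_char_width ch
        if c + w > column then (some i, c)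
        else pvALoop column rest (c + w) text_mode
    else
      if ch = STYLE_END then pvALoop column rest c true
      else pvALoop column rest c text_mode

def compute_styled_text_index_of_column (styled_text : String) (column : Int) : Option Int × Int :=
  pvALoop column (PySem.List.enumerate styled_text.toList) 0 true

-- ===== PORT B =====
-- pass 1: strip marker regions, keeping (index, char) of visible chars
def pvStrip : List (Int × Char) → Bool → List (Int × Char)
  | [], _ => []
  | (i, ch) :: rest, text_mode =>
    if text_mode then
      if ch = STYLE_BEGIN then pvStrip rest false
      else (i, ch) :: pvStrip rest true
    else
      if ch = STYLE_END then pvStrip rest true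
      else pvStrip rest false

-- pass 2: walk columns over the visible list
def pvWalk (column : Int) : List (Int × Char) → Int → Option Int × Int
  | [], c => (none, c)
  | (i, ch) :: rest, c =>
    let w := get_char_width ch
    if c + w > column then (some i, c)
    else pvWalk column rest (c + w)

def compute_styled_text_index_of_column_alt (styled_text : String) (column : Int) : Option Int × Int :=
  pvWalk column (pvStrip (PySem.List.enumerate styled_text.toList) true) 0

-- ===== PRECONDITION & SPEC =====
def Spec_compute_styled_text_index_of_column (styled_text : String) (column : Int) (out : Option Int × Int) : Prop := out = compute_styled_text_index_of_column_alt styled_text column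
instance (styled_text : String) (column : Int) (out : Option Int × Int) : Decidable (Spec_compute_styled_text_index_of_column styled_text column out) := by unfold Spec_compute_styled_text_index_of_column; infer_instance

-- ===== CLAIM (what is proved, stated in full; the proofs are below) =====
def Claim_equal_compute_styled_text_index_of_column : Prop := ∀ (styled_text : String) (column : Int), Dom_compute_styled_text_index_of_column styled_text column → Spec_compute_styled_text_index_of_column styled_text column (compute_styled_text_index_of_column styled_text column)

-- ===== LEMMAS AND PROOFS =====
-- the fused loop equals the strip-then-walk composition, for any state
theorem pvALoop_eq_walk_strip (column : Int) (l : List (Int × Char)) :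
    ∀ (c : Int) (tm : Bool), pvALoop column l c tm = pvWalk column (pvStrip l tm) c := by
  induction l with
  | nil => intro c tm; rfl
  | cons p rest ih =>
    intro c tm
    obtain ⟨i, ch⟩ := p
    cases tm
    · simp only [pvALoop, pvStrip]
      by_cases h : ch = STYLE_END <;> simp [h, ih]
    · simp only [pvALoop, pvStrip]
      by_cases hb : ch = STYLE_BEGIN
      · simp [hb, ih]
      · by_cases hc : c + get_char_width ch > column <;>
          simp [pvWalk, hb, ih, get_char_width]

-- ===== VERDICT (by name: the statement is the Claim_ definition above) =====
theorem compute_styled_text_index_of_column_spec : Claim_equal_compute_styled_text_index_of_column := by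
  intro styled_text column _
  unfold Spec_compute_styled_text_index_of_column compute_styled_text_index_of_column
    compute_styled_text_index_of_column_alt
  exact pvALoop_eq_walk_strip column _ 0 true
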